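-- pv_equiv track=rewrite | github.com/jenjungjj/CS111 | ps2/ps2pr7.py | smaller_of
-- ===== SOURCE A (Python) =====
-- def smaller_of(vals1, vals2):
--     """ returns a list in which each element is the smaller value
--         between the two original lists
--         input vals1 and vals2 are lists
--     """
--     if len(vals1) == 1 or len(vals2) == 1:
--         if vals1[0] > vals2[0]:
--             return vals2
--         else:
--             return vals1
--     elif len(vals1) == 0 or len(vals2) == 0:
--         return []
--     else:
--         smaller_vals = smaller_of(vals1[1:], vals2[1:])
--         if vals1[0] > vals2[0]:
--             return [vals2[0]] + smaller_vals
--         else: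
--             return [vals1[0]] + smaller_vals
-- ===== SOURCE B (Python) =====
-- def smaller_of(vals1, vals2):
--     if not vals1 or not vals2:
--         return []
--     k = min(len(vals1), len(vals2)) - 1
--     out = [min(a, b) for a, b in zip(vals1[:k], vals2[:k])]
--     out += vals2[k:] if vals1[k] > vals2[k] else vals1[k:]
--     return out
-- ===== Notes on version B (the rewrite author's own statement) =====
-- stated objective: faster
-- what changed: Replaced the recursion (which rebuilds a list by prepending at each of O(n) levels, with O(n) slicing per level) by a single linear pass: zip the common prefixes, take element-wise minima, and append the tail of the list whose element is smaller at the last compared index.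
import Mathlib
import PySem

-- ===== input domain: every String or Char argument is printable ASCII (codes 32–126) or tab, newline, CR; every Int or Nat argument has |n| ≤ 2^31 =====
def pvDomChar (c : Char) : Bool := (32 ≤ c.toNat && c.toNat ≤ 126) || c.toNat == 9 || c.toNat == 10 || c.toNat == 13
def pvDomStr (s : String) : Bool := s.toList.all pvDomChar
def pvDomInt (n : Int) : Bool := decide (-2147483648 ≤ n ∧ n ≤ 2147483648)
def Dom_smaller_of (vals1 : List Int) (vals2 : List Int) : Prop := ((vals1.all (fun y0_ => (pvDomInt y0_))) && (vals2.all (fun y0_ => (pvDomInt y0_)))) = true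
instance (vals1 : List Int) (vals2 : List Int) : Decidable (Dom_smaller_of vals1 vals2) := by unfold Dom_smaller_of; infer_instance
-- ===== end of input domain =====

-- B replaces A's quadratic recursion by one linear pass (element-wise minima of the common prefix, then the tail of the list with the smaller last compared element).

-- ===== PORT A =====
-- vals1[0]/vals2[0] (read when both lists are nonempty on every input in Pre_)
-- are ported as headI; Pre_ excludes exactly the IndexError inputs.
def smaller_of (vals1 : List Int) (vals2 : List Int) : List Int :=
  if vals1.length = 1 ∨ vals2.length = 1 then
    if vals1.headI > vals2.headI then vals2 else vals1
  else if h : vals1.length = 0 ∨ vals2.length = 0 then []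
  else
    let smaller_vals := smaller_of (vals1.drop 1) (vals2.drop 1)
    if vals1.headI > vals2.headI then vals2.headI :: smaller_vals
    else vals1.headI :: smaller_vals
termination_by vals1.length
decreasing_by push_neg at h; simp; omega
-- ===== PORT B =====
def smaller_of_alt (vals1 : List Int) (vals2 : List Int) : List Int :=
  if vals1 = [] ∨ vals2 = [] then []
  else
    let k := min vals1.length vals2.length - 1
    let out := ((vals1.take k).zip (vals2.take k)).map (fun p => min p.1 p.2)
    out ++ (if vals1.getD k 0 > vals2.getD k 0 then vals2.drop k else vals1.drop k)

-- ===== PRECONDITION & SPEC =====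
-- Pre_ excludes exactly the inputs where Python A raises IndexError: one list
-- empty and the other a singleton.
def Pre_smaller_of (vals1 : List Int) (vals2 : List Int) : Prop :=
  ¬ ((vals1 = [] ∧ vals2.length = 1) ∨ (vals2 = [] ∧ vals1.length = 1))
instance (vals1 : List Int) (vals2 : List Int) : Decidable (Pre_smaller_of vals1 vals2) := by unfold Pre_smaller_of; infer_instance
def pvWitness_smaller_of : List Int × List Int := ([3, 1, 4], [2, 5])

def Spec_smaller_of (vals1 : List Int) (vals2 : List Int) (out : List Int) : Prop := out = smaller_of_alt vals1 vals2
instance (vals1 : List Int) (vals2 : List Int) (out : List Int) : Decidable (Spec_smaller_of vals1 vals2 out) := by unfold Spec_smaller_of; infer_instance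

-- ===== CLAIM (what is proved, stated in full; the proofs are below) =====
def Claim_equal_smaller_of : Prop := ∀ (vals1 : List Int) (vals2 : List Int), Dom_smaller_of vals1 vals2 → Pre_smaller_of vals1 vals2 → Spec_smaller_of vals1 vals2 (smaller_of vals1 vals2)

-- ===== LEMMAS AND PROOFS =====
lemma alt_cons (h1 h2 : Int) (t1 t2 : List Int) (ht1 : t1 ≠ []) (ht2 : t2 ≠ []) :
    smaller_of_alt (h1 :: t1) (h2 :: t2) = min h1 h2 :: smaller_of_alt t1 t2 := by
  have l1 : 1 ≤ t1.length := List.length_pos_iff.mpr ht1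
  have l2 : 1 ≤ t2.length := List.length_pos_iff.mpr ht2
  unfold smaller_of_alt
  rw [if_neg (by simp), if_neg (by simp [ht1, ht2])]
  have hk : min (h1 :: t1).length (h2 :: t2).length - 1 = (min t1.length t2.length - 1) + 1 := by
    simp; omega
  simp only [hk, List.take_succ_cons, List.zip_cons_cons, List.map_cons,
    List.getD_cons_succ, List.drop_succ_cons, List.cons_append]
lemma main_eq : ∀ (vals1 vals2 : List Int), Pre_smaller_of vals1 vals2 →
    smaller_of vals1 vals2 = smaller_of_alt vals1 vals2 := by
  intro vals1 vals2 hpre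
  induction vals1, vals2 using smaller_of.induct with
  | case1 v1 v2 hlen hc =>
    rw [smaller_of, if_pos hlen, if_pos hc]
    unfold Pre_smaller_of at hpre
    rcases v1 with _ | ⟨a, t1⟩
    · rcases hlen with h | h
      · simp at h
      · exact absurd (Or.inl ⟨rfl, h⟩) hpre
    rcases v2 with _ | ⟨b, t2⟩
    · rcases hlen with h | h
      · exact absurd (Or.inr ⟨rfl, h⟩) hpre
      · simp at h
    simp only [List.headI] at hc
    have hk0 : min t1.length t2.length = 0 := by
      rcases hlen with h | h <;> simp at h <;> simp [h]
    simp [smaller_of_alt, hk0, hc]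
  | case2 v1 v2 hlen hc =>
    rw [smaller_of, if_pos hlen, if_neg hc]
    unfold Pre_smaller_of at hpre
    rcases v1 with _ | ⟨a, t1⟩
    · rcases hlen with h | h
      · simp at h
      · exact absurd (Or.inl ⟨rfl, h⟩) hpre
    rcases v2 with _ | ⟨b, t2⟩
    · rcases hlen with h | h
      · exact absurd (Or.inr ⟨rfl, h⟩) hpre
      · simp at h
    simp only [List.headI] at hc
    have hk0 : min t1.length t2.length = 0 := by
      rcases hlen with h | h <;> simp at h <;> simp [h]
    simp [smaller_of_alt, hk0, hc]
  | case3 v1 v2 hlen hz =>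
    rw [smaller_of, if_neg hlen, dif_pos hz]
    rcases hz with h | h
    · simp [List.length_eq_zero_iff.mp h, smaller_of_alt]
    · simp [List.length_eq_zero_iff.mp h, smaller_of_alt]
  | case4 v1 v2 hlen hz hcond ih =>
    rcases v1 with _ | ⟨a, t1⟩
    · simp at hz
    rcases v2 with _ | ⟨b, t2⟩
    · simp at hz
    have ht1 : t1 ≠ [] := fun h => hlen (Or.inl (by simp [h]))
    have ht2 : t2 ≠ [] := fun h => hlen (Or.inr (by simp [h]))
    have hpre' : Pre_smaller_of t1 t2 := by
      unfold Pre_smaller_of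
      rintro (⟨h, _⟩ | ⟨h, _⟩)
      · exact ht1 h
      · exact ht2 h
    simp only [List.headI] at hcond
    rw [smaller_of, if_neg hlen, dif_neg hz]
    simp only [List.drop_succ_cons, List.drop_zero] at ih ⊢
    simp only [List.headI]
    rw [if_pos hcond, ih hpre', alt_cons a b t1 t2 ht1 ht2,
      min_eq_right (le_of_lt hcond)]
  | case5 v1 v2 hlen hz hcond ih =>
    rcases v1 with _ | ⟨a, t1⟩
    · simp at hz
    rcases v2 with _ | ⟨b, t2⟩
    · simp at hz
    have ht1 : t1 ≠ [] := fun h => hlen (Or.inl (by simp [h]))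
    have ht2 : t2 ≠ [] := fun h => hlen (Or.inr (by simp [h]))
    have hpre' : Pre_smaller_of t1 t2 := by
      unfold Pre_smaller_of
      rintro (⟨h, _⟩ | ⟨h, _⟩)
      · exact ht1 h
      · exact ht2 h
    simp only [List.headI] at hcond
    rw [smaller_of, if_neg hlen, dif_neg hz]
    simp only [List.drop_succ_cons, List.drop_zero] at ih ⊢
    simp only [List.headI]
    rw [if_neg hcond, ih hpre', alt_cons a b t1 t2 ht1 ht2,
      min_eq_left (not_lt.mp hcond)]

-- ===== VERDICT (by name: the statement is the Claim_ definition above) =====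
theorem smaller_of_spec : Claim_equal_smaller_of := by
  intro v1 v2 _ hpre
  unfold Spec_smaller_of
  exact main_eq v1 v2 hpre
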